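-- pv_equiv track=rewrite | github.com/ja153903/cracking-the-coding-interview-python | arrays_and_strings/one_away/main.py | can_add
-- ===== SOURCE A (Python) =====
-- from collections import Counter
--
-- def can_add(s: str, t: str) -> bool:
--     if len(s) == len(t):
--         return False
--
--     longer, shorter = (t, s) if len(s) < len(t) else (s, t)
--
--     longer_cnt = Counter(longer)
--
--     for char in shorter:
--         if char not in longer_cnt or longer_cnt[char] == 0:
--             return False
--
--         longer_cnt[char] -= 1
--
--     return sum(longer_cnt.values()) == 1
-- ===== SOURCE B (Python) =====
-- def can_add(s: str, t: str) -> bool: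
--     # True iff the lengths differ by exactly one and the shorter string's
--     # characters (as a multiset) all fit inside the longer string.
--     if abs(len(s) - len(t)) != 1:
--         return False
--
--     short, long = (s, t) if len(s) < len(t) else (t, s)
--     a, b = sorted(short), sorted(long)
--
--     # two-pointer merge over the two sorted lists: advance through the longer,
--     # consuming the shorter's next character whenever it matches
--     i = j = 0
--     while i < len(a) and j < len(b):
--         if a[i] == b[j]:
--             i += 1
--         j += 1
--     return i == len(a)
-- ===== Notes on version B (the rewrite author's own statement) =====
-- stated objective: alternative
-- what changed: Replaces the Counter build-and-decrement loop plus a final residual-sum test with an up-front length-difference guard followed by sorting both strings and a two-pointer merge that checks the shorter sorted string is a subsequence of the longer.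
import Mathlib
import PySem

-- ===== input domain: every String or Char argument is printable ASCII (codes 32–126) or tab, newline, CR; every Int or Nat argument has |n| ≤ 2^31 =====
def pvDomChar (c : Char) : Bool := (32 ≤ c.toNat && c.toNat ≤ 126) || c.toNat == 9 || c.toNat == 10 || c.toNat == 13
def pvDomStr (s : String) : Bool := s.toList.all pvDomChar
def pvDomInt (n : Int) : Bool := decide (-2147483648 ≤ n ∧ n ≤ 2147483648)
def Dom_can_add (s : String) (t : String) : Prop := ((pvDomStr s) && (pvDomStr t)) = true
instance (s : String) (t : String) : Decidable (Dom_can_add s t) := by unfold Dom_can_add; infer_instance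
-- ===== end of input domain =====

-- One honest line: B replaces A's Counter-decrement loop + residual-sum test by a
-- length-difference guard, sorting both strings and a two-pointer subsequence scan
-- (a different algorithm of similar cost, not claimed faster).

-- ===== PORT A =====
-- the 'for char in shorter' loop over the Counter; none = the early 'return False'
def canAddLoop : List Char → PySem.Dict Char Int → Option (PySem.Dict Char Int)
  | [], d => some d
  | c :: rest, d =>
    if !(d.contains c) || d.getD c 0 == 0 then none
    else canAddLoop rest (d.modify c 0 (· - 1))

def can_add (s : String) (t : String) : Bool :=
  let sl := s.toList
  let tl := t.toList
  if sl.length == tl.length then false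
  else
    let p := if sl.length < tl.length then (tl, sl) else (sl, tl)  -- (longer, shorter)
    match canAddLoop p.2 (PySem.Dict.counter p.1) with
    | none => false
    | some d => d.values.sum == 1

-- ===== PORT B =====
-- the while loop: i/j pointers become the remaining suffixes of the two sorted lists
def twoPtr : List Char → List Char → Bool
  | [], _ => true
  | _ :: _, [] => false
  | x :: xs, y :: ys => if x == y then twoPtr xs ys else twoPtr (x :: xs) ys

def can_add_alt (s : String) (t : String) : Bool :=
  let sl := s.toList
  let tl := t.toList
  if ((sl.length : Int) - (tl.length : Int)).natAbs != 1 then false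
  else
    let p := if sl.length < tl.length then (sl, tl) else (tl, sl)  -- (short, long)
    twoPtr (PySem.List.sorted p.1 (fun x => x) false) (PySem.List.sorted p.2 (fun x => x) false)

-- ===== PRECONDITION & SPEC =====
def Spec_can_add (s : String) (t : String) (out : Bool) : Prop := out = can_add_alt s t
instance (s : String) (t : String) (out : Bool) : Decidable (Spec_can_add s t out) := by unfold Spec_can_add; infer_instance

-- ===== CLAIM (what is proved, stated in full; the proofs are below) =====
def Claim_equal_can_add : Prop := ∀ (s : String) (t : String), Dom_can_add s t → Spec_can_add s t (can_add s t)

-- ===== LEMMAS AND PROOFS =====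

-- A's loop, failure side: some character of sh exceeds its budget in d
lemma canAddLoop_none (sh : List Char) (d : PySem.Dict Char Int)
    (hnn : ∀ c, 0 ≤ d.getD c 0)
    (hcond : ¬ ∀ c, (sh.count c : Int) ≤ d.getD c 0) :
    canAddLoop sh d = none := by
  induction sh generalizing d with
  | nil =>
    exact absurd (fun c => by simpa using hnn c) hcond
  | cons c rest ih =>
    by_cases hfail : (!(d.contains c) || d.getD c 0 == 0) = true
    · simp [canAddLoop, hfail]
    · have hproceed : d.getD c 0 ≠ 0 := by
        simp only [Bool.or_eq_true, Bool.not_eq_true', beq_iff_eq, not_or] at hfail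
        exact hfail.2
      simp only [canAddLoop, hfail]
      apply ih
      · intro c'
        rw [PySem.Dict.getD_modify]
        split_ifs with h
        · subst h; have h1 := hnn c'; have h2 := hproceed; omega
        · exact hnn c'
      · intro hall
        apply hcond
        intro c'
        have := hall c'
        rw [PySem.Dict.getD_modify] at this
        by_cases h : c' = c
        · subst h
          rw [List.count_cons_self]
          rw [if_pos rfl] at this
          push_cast at this ⊢
          omega
        · rw [if_neg h] at this
          have h' : ¬ c = c' := fun hh => h hh.symm
          simpa [List.count_cons, h'] using this

-- A's loop, success side: it returns a dict with the same keys and decremented counts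
lemma canAddLoop_some (sh : List Char) (d : PySem.Dict Char Int)
    (hnd : d.keys.Nodup)
    (hcond : ∀ c, (sh.count c : Int) ≤ d.getD c 0) :
    ∃ d', canAddLoop sh d = some d' ∧ d'.keys = d.keys ∧
      ∀ c, d'.getD c 0 = d.getD c 0 - (sh.count c : Int) := by
  induction sh generalizing d with
  | nil => exact ⟨d, rfl, rfl, fun c => by simp⟩
  | cons c rest ih =>
    have hge : (1 : Int) ≤ d.getD c 0 := by
      have := hcond c
      rw [List.count_cons_self] at this
      have hr : (0 : Int) ≤ (rest.count c : Int) := by positivity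
      push_cast at this; omega
    have hcont : d.contains c = true := by
      by_contra h
      have := PySem.Dict.getD_of_not_contains d (0 : Int) (by simpa using h)
      omega
    have hne : (d.getD c 0 == 0) = false := by simp; omega
    have hstep : (!(d.contains c) || d.getD c 0 == 0) = false := by
      simp [hcont, hne]
    let d1 := d.modify c 0 (· - 1)
    have hk1 : d1.keys = d.keys := by
      rw [PySem.Dict.keys_modify, PySem.Dict.keys_insert_of_contains d _ hcont]
    have hg1 : ∀ c', d1.getD c' 0 = if c' = c then d.getD c 0 - 1 else d.getD c' 0 := by
      intro c'; exact PySem.Dict.getD_modify d c c' 0 (· - 1)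
    obtain ⟨d', h1, h2, h3⟩ := ih d1 (hk1 ▸ hnd) (by
      intro c'
      rw [hg1 c']
      have := hcond c'
      by_cases h : c' = c
      · subst h; rw [List.count_cons_self] at this; push_cast at this ⊢; omega
      · have h' : ¬ c = c' := fun hh => h hh.symm
        rw [if_neg h]; simpa [List.count_cons, h'] using this)
    refine ⟨d', ?_, h2.trans hk1, ?_⟩
    · simp only [canAddLoop, hstep]
      exact h1
    · intro c'
      rw [h3 c', hg1 c']
      by_cases h : c' = c
      · subst h; rw [List.count_cons_self, if_pos rfl]; push_cast; omega
      · have h' : ¬ c = c' := fun hh => h hh.symm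
        rw [if_neg h]; simp [h']

-- sum of the residual counts over the distinct characters of L
lemma sum_residual (L sh : List Char) (hsub : ∀ c ∈ sh, c ∈ L) :
    ((PySem.Set.ofList L).map (fun k => ((L.count k : Int) - (sh.count k : Int)))).sum
      = (L.length : Int) - (sh.length : Int) := by
  have hnd : (PySem.Set.ofList L).Nodup := PySem.Set.nodup_ofList L
  have hfin : (PySem.Set.ofList L).toFinset = L.toFinset := by
    ext x; simp [PySem.Set.mem_ofList]
  rw [← List.sum_toFinset _ hnd, hfin, Finset.sum_sub_distrib]
  have h1 : ∑ x ∈ L.toFinset, ((L.count x : Int)) = (L.length : Int) := by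
    rw [← Nat.cast_sum]
    exact_mod_cast congrArg (Nat.cast : ℕ → ℤ) (List.sum_toFinset_count_eq_length L)
  have h2 : ∑ x ∈ L.toFinset, ((sh.count x : Int)) = (sh.length : Int) := by
    rw [← Nat.cast_sum]
    have : ∑ x ∈ L.toFinset, sh.count x = ∑ x ∈ sh.toFinset, sh.count x := by
      apply (Finset.sum_subset ?_ ?_).symm
      · intro x hx; simp only [List.mem_toFinset] at *; exact hsub x hx
      · intro x _ hx; simp only [List.mem_toFinset] at hx
        exact List.count_eq_zero_of_not_mem hx
    rw [this]
    exact_mod_cast congrArg (Nat.cast : ℕ → ℤ) (List.sum_toFinset_count_eq_length sh)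
  rw [h1, h2]

-- A's core (after the longer/shorter choice): loop + residual-sum test,
-- characterised as multiset containment plus length difference exactly one
lemma aCore (L sh : List Char) :
    ((match canAddLoop sh (PySem.Dict.counter L) with
      | none => false
      | some d => d.values.sum == 1) = true)
      ↔ ((∀ c, sh.count c ≤ L.count c) ∧ L.length = sh.length + 1) := by
  by_cases hc : ∀ c, sh.count c ≤ L.count c
  · obtain ⟨d', h1, h2, h3⟩ := canAddLoop_some sh (PySem.Dict.counter L)
      (PySem.Dict.nodup_keys_counter L)
      (fun c => by rw [PySem.Dict.getD_counter]; exact_mod_cast hc c)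
    rw [h1]
    have hsub : ∀ c ∈ sh, c ∈ L := by
      intro c hcmem
      have h0 : 0 < sh.count c := List.count_pos_iff.mpr hcmem
      have := hc c
      exact List.count_pos_iff.mp (by omega)
    have hvals : d'.values.sum = (L.length : Int) - (sh.length : Int) := by
      rw [PySem.Dict.values_eq_map_keys d' (h2 ▸ PySem.Dict.nodup_keys_counter L) 0,
          h2, PySem.Dict.keys_counter]
      have : (fun k => d'.getD k 0) = fun k => ((L.count k : Int) - (sh.count k : Int)) := by
        funext k; rw [h3 k, PySem.Dict.getD_counter]
      rw [this]
      exact sum_residual L sh hsub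
    have hlen : sh.length ≤ L.length :=
      (List.subperm_ext_iff.mpr (fun c _ => hc c)).length_le
    simp only [hvals, beq_iff_eq]
    constructor
    · intro h; exact ⟨hc, by omega⟩
    · intro h; omega
  · rw [canAddLoop_none sh (PySem.Dict.counter L)
      (fun c => by rw [PySem.Dict.getD_counter]; positivity)
      (by intro hall; apply hc; intro c; have := hall c
          rw [PySem.Dict.getD_counter] at this; exact_mod_cast this)]
    simp only [Bool.false_eq_true, false_iff]
    intro h; exact hc h.1

-- the two-pointer scan is exactly the greedy sublist test
lemma twoPtr_eq_isSublist (a b : List Char) : twoPtr a b = a.isSublist b := by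
  induction b generalizing a with
  | nil => cases a <;> rfl
  | cons y ys ih =>
    cases a with
    | nil => rfl
    | cons x xs =>
      simp only [twoPtr, List.isSublist]
      split_ifs with h <;> [exact ih xs; exact ih (x :: xs)]

-- B's core: twoPtr on the two sorted lists decides multiset containment
lemma bCore (sh L : List Char) :
    (twoPtr (PySem.List.sorted sh (fun x => x) false)
            (PySem.List.sorted L (fun x => x) false) = true)
      ↔ ∀ c, sh.count c ≤ L.count c := by
  rw [twoPtr_eq_isSublist, List.isSublist_iff_sublist]
  have psh := PySem.List.sorted_perm sh (fun x => x) false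
  have pL := PySem.List.sorted_perm L (fun x => x) false
  constructor
  · intro hsl c
    have hsp : sh.Subperm L := ((psh.symm.subperm.trans hsl.subperm).trans pL.subperm)
    by_cases hmem : c ∈ sh
    · exact List.subperm_ext_iff.mp hsp c hmem
    · simp [List.count_eq_zero_of_not_mem hmem]
  · intro hc
    have hsp : (PySem.List.sorted sh (fun x => x) false).Subperm
        (PySem.List.sorted L (fun x => x) false) := by
      apply List.subperm_ext_iff.mpr
      intro x _
      rw [psh.count_eq, pL.count_eq]
      exact hc x
    exact List.sublist_of_subperm_of_pairwise hsp
      (by simpa using PySem.List.sorted_pairwise sh (fun x => x))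
      (by simpa using PySem.List.sorted_pairwise L (fun x => x))

-- ===== VERDICT (by name: the statement is the Claim_ definition above) =====
theorem can_add_spec : Claim_equal_can_add := by
  intro s t _
  unfold Spec_can_add can_add can_add_alt
  have es : s.toList.length = s.length := by simp
  have et : t.toList.length = t.length := by simp
  rcases lt_trichotomy s.toList.length t.toList.length with hlt | heq | hgt
  · have h1 : (s.toList.length == t.toList.length) = false := by simp; omega
    simp only [h1, Bool.false_eq_true, if_false, if_pos hlt]
    rw [Bool.eq_iff_iff]
    by_cases habs : ((s.toList.length : Int) - (t.toList.length : Int)).natAbs = 1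
    · have h2 : (((s.toList.length : Int) - (t.toList.length : Int)).natAbs != 1) = false := by
        simp
        omega
      simp only [h2, Bool.false_eq_true, if_false]
      rw [aCore, bCore]
      exact ⟨fun h => h.1, fun h => ⟨h, by omega⟩⟩
    · have h2 : (((s.toList.length : Int) - (t.toList.length : Int)).natAbs != 1) = true := by
        simp
        omega
      simp only [h2, if_true, Bool.false_eq_true, iff_false]
      rw [aCore]
      exact fun h => habs (by omega)
  · simp [heq]
  · have h1 : (s.toList.length == t.toList.length) = false := by simp; omega
    have h3 : ¬ s.toList.length < t.toList.length := by omega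
    simp only [h1, Bool.false_eq_true, if_false, if_neg h3]
    rw [Bool.eq_iff_iff]
    by_cases habs : ((s.toList.length : Int) - (t.toList.length : Int)).natAbs = 1
    · have h2 : (((s.toList.length : Int) - (t.toList.length : Int)).natAbs != 1) = false := by
        simp
        omega
      simp only [h2, Bool.false_eq_true, if_false]
      rw [aCore, bCore]
      exact ⟨fun h => h.1, fun h => ⟨h, by omega⟩⟩
    · have h2 : (((s.toList.length : Int) - (t.toList.length : Int)).natAbs != 1) = true := by
        simp
        omega
      simp only [h2, if_true, Bool.false_eq_true, iff_false]
      rw [aCore]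
      exact fun h => habs (by omega)
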